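-- pv_equiv track=rewrite | github.com/JonaxHS/videogen | backend/modules/composer.py | get_sources_from_segments
-- ===== SOURCE A (Python) =====
-- from typing import List, Dict, Callable, Optional
--
-- def get_sources_from_segments(segments: List[Dict]) -> Dict[str, int]:
--     """
--     Extract providers used from segments.
--     Returns dict with count: {'nasa': 2, 'pexels': 1, 'esa': 0, 'pixabay': 0}
--     """
--     sources = {
--         'nasa': 0,
--         'esa': 0,
--         'pexels': 0,
--         'pixabay': 0,
--         'manual': 0
--     }
--
--     for segment in segments:
--         provider = segment.get('video_provider', 'manual').lower()
--         if provider in sources: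
--             sources[provider] += 1
--
--     return sources
-- ===== SOURCE B (Python) =====
-- def get_sources_from_segments(segments):
--     """
--     Extract providers used from segments.
--     Returns dict with count: {'nasa': 2, 'pexels': 1, 'esa': 0, 'pixabay': 0}
--     """
--     keys = ('nasa', 'esa', 'pexels', 'pixabay', 'manual')
--     return {key: sum(1 for segment in segments
--                      if segment.get('video_provider', 'manual').lower() == key)
--             for key in keys}
-- ===== Notes on version B (the rewrite author's own statement) =====
-- stated objective: alternative
-- what changed: Replaces the single accumulating pass that updates a mutable counter dict with a dict comprehension over the fixed five provider keys, counting matching segments for each key by an independent scan.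
import Mathlib
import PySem

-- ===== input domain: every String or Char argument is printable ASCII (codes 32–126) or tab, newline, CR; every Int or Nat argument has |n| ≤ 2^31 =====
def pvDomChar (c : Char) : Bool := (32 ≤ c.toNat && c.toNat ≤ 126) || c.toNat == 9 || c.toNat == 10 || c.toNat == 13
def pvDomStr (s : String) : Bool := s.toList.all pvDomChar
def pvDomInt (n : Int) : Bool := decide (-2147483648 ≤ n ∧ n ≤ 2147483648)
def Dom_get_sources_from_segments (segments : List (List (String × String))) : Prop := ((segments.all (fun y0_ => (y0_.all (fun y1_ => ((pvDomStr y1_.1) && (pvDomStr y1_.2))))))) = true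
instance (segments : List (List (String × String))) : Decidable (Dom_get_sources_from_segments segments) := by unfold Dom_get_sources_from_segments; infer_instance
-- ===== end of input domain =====

-- B counts each of the five fixed providers by an independent scan over the segments,
-- instead of A's single accumulating pass over a mutable counter dict (objective: alternative).

-- ===== PORT A =====
-- segment.get('video_provider', 'manual').lower()
def pvProviderA (segment : List (String × String)) : String :=
  PySem.Str.lower (PySem.Dict.getD (PySem.Dict.mk segment) "video_provider" "manual")

-- the loop body: provider resolution, membership test, sources[provider] += 1
def pvStepA (sources : PySem.Dict String Int) (segment : List (String × String)) : PySem.Dict String Int :=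
  let provider := pvProviderA segment
  if sources.contains provider then
    -- sources[provider] += 1  (key present, so getD's default is never used)
    sources.insert provider (sources.getD provider 0 + 1)
  else sources

def get_sources_from_segments (segments : List (List (String × String))) : List (String × Int) :=
  (segments.foldl pvStepA
    (PySem.Dict.mk [("nasa", 0), ("esa", 0), ("pexels", 0), ("pixabay", 0), ("manual", 0)])).items

-- ===== PORT B =====
def pvProviderB (segment : List (String × String)) : String :=
  PySem.Str.lower (PySem.Dict.getD (PySem.Dict.mk segment) "video_provider" "manual")

-- {key: sum(1 for segment in segments if … == key) for key in keys}
def get_sources_from_segments_alt (segments : List (List (String × String))) : List (String × Int) :=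
  ["nasa", "esa", "pexels", "pixabay", "manual"].map
    (fun key => (key, (segments.countP (fun segment => pvProviderB segment == key) : Int)))

-- ===== PRECONDITION & SPEC =====
def Spec_get_sources_from_segments (segments : List (List (String × String))) (out : List (String × Int)) : Prop := out = get_sources_from_segments_alt segments
instance (segments : List (List (String × String))) (out : List (String × Int)) : Decidable (Spec_get_sources_from_segments segments out) := by unfold Spec_get_sources_from_segments; infer_instance

-- ===== CLAIM (what is proved, stated in full; the proofs are below) =====
def Claim_equal_get_sources_from_segments : Prop := ∀ (segments : List (List (String × String))), Dom_get_sources_from_segments segments → Spec_get_sources_from_segments segments (get_sources_from_segments segments)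

-- ===== LEMMAS AND PROOFS =====
theorem pv_fold (segments : List (List (String × String))) (a b c d e : Int) :
    segments.foldl pvStepA
      (PySem.Dict.mk [("nasa", a), ("esa", b), ("pexels", c), ("pixabay", d), ("manual", e)]) =
    PySem.Dict.mk [("nasa", a + (segments.countP (fun s => pvProviderA s == "nasa") : Int)),
                   ("esa", b + (segments.countP (fun s => pvProviderA s == "esa") : Int)),
                   ("pexels", c + (segments.countP (fun s => pvProviderA s == "pexels") : Int)),
                   ("pixabay", d + (segments.countP (fun s => pvProviderA s == "pixabay") : Int)),
                   ("manual", e + (segments.countP (fun s => pvProviderA s == "manual") : Int))] := by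
  induction segments generalizing a b c d e with
  | nil => simp
  | cons s t ih =>
    rw [List.foldl_cons]
    by_cases h1 : pvProviderA s = "nasa"
    · have h : pvStepA (PySem.Dict.mk [("nasa", a), ("esa", b), ("pexels", c), ("pixabay", d), ("manual", e)]) s
          = PySem.Dict.mk [("nasa", a + 1), ("esa", b), ("pexels", c), ("pixabay", d), ("manual", e)] := by
        simp [pvStepA, h1, PySem.Dict.contains, PySem.Dict.insert, PySem.Dict.getD, PySem.Dict.get?]
      rw [h, ih]
      simp [h1]
      ring_nf
    by_cases h2 : pvProviderA s = "esa"
    · have h : pvStepA (PySem.Dict.mk [("nasa", a), ("esa", b), ("pexels", c), ("pixabay", d), ("manual", e)]) s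
          = PySem.Dict.mk [("nasa", a), ("esa", b + 1), ("pexels", c), ("pixabay", d), ("manual", e)] := by
        simp [pvStepA, h2, PySem.Dict.contains, PySem.Dict.insert, PySem.Dict.getD, PySem.Dict.get?]
      rw [h, ih]
      simp [h1, h2]
      ring_nf
    by_cases h3 : pvProviderA s = "pexels"
    · have h : pvStepA (PySem.Dict.mk [("nasa", a), ("esa", b), ("pexels", c), ("pixabay", d), ("manual", e)]) s
          = PySem.Dict.mk [("nasa", a), ("esa", b), ("pexels", c + 1), ("pixabay", d), ("manual", e)] := by
        simp [pvStepA, h3, PySem.Dict.contains, PySem.Dict.insert, PySem.Dict.getD, PySem.Dict.get?]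
      rw [h, ih]
      simp [h1, h2, h3]
      ring_nf
    by_cases h4 : pvProviderA s = "pixabay"
    · have h : pvStepA (PySem.Dict.mk [("nasa", a), ("esa", b), ("pexels", c), ("pixabay", d), ("manual", e)]) s
          = PySem.Dict.mk [("nasa", a), ("esa", b), ("pexels", c), ("pixabay", d + 1), ("manual", e)] := by
        simp [pvStepA, h4, PySem.Dict.contains, PySem.Dict.insert, PySem.Dict.getD, PySem.Dict.get?]
      rw [h, ih]
      simp [h1, h2, h3, h4]
      ring_nf
    by_cases h5 : pvProviderA s = "manual"
    · have h : pvStepA (PySem.Dict.mk [("nasa", a), ("esa", b), ("pexels", c), ("pixabay", d), ("manual", e)]) s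
          = PySem.Dict.mk [("nasa", a), ("esa", b), ("pexels", c), ("pixabay", d), ("manual", e + 1)] := by
        simp [pvStepA, h5, PySem.Dict.contains, PySem.Dict.insert, PySem.Dict.getD, PySem.Dict.get?]
      rw [h, ih]
      simp [h1, h2, h3, h4, h5]
      ring_nf
    have h : pvStepA (PySem.Dict.mk [("nasa", a), ("esa", b), ("pexels", c), ("pixabay", d), ("manual", e)]) s
        = PySem.Dict.mk [("nasa", a), ("esa", b), ("pexels", c), ("pixabay", d), ("manual", e)] := by
      simp only [pvStepA, PySem.Dict.contains, List.any_cons, List.any_nil, beq_iff_eq]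
      have : ∀ k : String, pvProviderA s ≠ k → (k = pvProviderA s) = False := by
        intro k hk; simp [Ne.symm hk]
      simp [this _ h1, this _ h2, this _ h3, this _ h4, this _ h5]
    rw [h, ih]
    simp [h1, h2, h3, h4, h5]

theorem get_sources_from_segments_spec : Claim_equal_get_sources_from_segments := by
  intro segments _
  show _ = _
  unfold get_sources_from_segments get_sources_from_segments_alt
  rw [pv_fold]
  simp [pvProviderA, pvProviderB]
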